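-- pv_equiv track=rewrite | github.com/musamairshad/HackerRank-Practice | Python/Python (Basic) Skills Certification Test/Missing Characters.py | missingCharacters
-- ===== SOURCE A (Python) =====
-- def missingCharacters(s):
--     updatedString = ""
--     d = [0, 1, 2, 3, 4, 5, 6, 7, 8, 9]
--     l = ['a', 'b', 'c', 'd', 'e', 'f', 'g', 'h', 'i', 'j', 'k', 'l', 'm', 'n',
--          'o', 'p', 'q', 'r', 's', 't', 'u', 'v', 'w', 'x', 'y', 'z'
--          ]
--     for i in d:
--         if (str(i) not in s):
--             updatedString += str(i)
--     for j in l: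
--         if (j not in s):
--             updatedString += j
--     return updatedString
-- ===== SOURCE B (Python) =====
-- def missingCharacters(s):
--     alphabet = "0123456789abcdefghijklmnopqrstuvwxyz"
--     return "".join(sorted(set(alphabet) - set(s)))
-- ===== Notes on version B (the rewrite author's own statement) =====
-- stated objective: idiomatic
-- what changed: Replaces the two per-character membership loops with a set difference between the fixed 36-character alphabet and set(s), followed by a sort whose code-point order (digits before lowercase letters) reproduces A's emission order.
import Mathlib
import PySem

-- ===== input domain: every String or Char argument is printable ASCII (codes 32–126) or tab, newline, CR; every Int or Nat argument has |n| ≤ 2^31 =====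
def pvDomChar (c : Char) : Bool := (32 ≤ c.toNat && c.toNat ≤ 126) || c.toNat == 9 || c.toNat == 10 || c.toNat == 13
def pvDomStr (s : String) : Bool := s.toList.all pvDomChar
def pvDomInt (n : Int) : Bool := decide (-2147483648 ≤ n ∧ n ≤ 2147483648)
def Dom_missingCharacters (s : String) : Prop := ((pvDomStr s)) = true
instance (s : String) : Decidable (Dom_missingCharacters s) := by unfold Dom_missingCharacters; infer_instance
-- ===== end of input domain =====

-- B replaces A's two per-character membership loops by set difference with the fixed
-- 36-char alphabet followed by a sort (idiomatic; same observable results).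

-- ===== PORT A =====
-- string concatenation is ported on the List Char side (PySem convention); String.ofList at the end
def missingCharacters (s : String) : String :=
  let d : List Int := [0, 1, 2, 3, 4, 5, 6, 7, 8, 9]
  let l : List Char := ['a','b','c','d','e','f','g','h','i','j','k','l','m','n',
                        'o','p','q','r','s','t','u','v','w','x','y','z']
  let u1 : List Char := d.foldl (fun acc i =>
    if PySem.Str.isIn (PySem.Int.toStr i) s then acc
    else acc ++ (PySem.Int.toStr i).toList) []
  let u2 : List Char := l.foldl (fun acc j =>
    if PySem.Str.isIn (String.ofList [j]) s then acc else acc ++ [j]) u1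
  String.ofList u2

-- ===== PORT B =====
def missingCharacters_alt (s : String) : String :=
  let alphabet : String := "0123456789abcdefghijklmnopqrstuvwxyz"
  let missing : PySem.Set Char :=
    PySem.Set.diff (PySem.Set.ofList alphabet.toList) (PySem.Set.ofList s.toList)
  PySem.Str.join "" ((PySem.List.sorted missing (fun c => c)).map (fun c => String.ofList [c]))

-- ===== PRECONDITION & SPEC =====
def Spec_missingCharacters (s : String) (out : String) : Prop := out = missingCharacters_alt s
instance (s : String) (out : String) : Decidable (Spec_missingCharacters s out) := by unfold Spec_missingCharacters; infer_instance

-- ===== CLAIM (what is proved, stated in full; the proofs are below) =====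
def Claim_equal_missingCharacters : Prop := ∀ (s : String), Dom_missingCharacters s → Spec_missingCharacters s (missingCharacters s)

-- ===== LEMMAS AND PROOFS =====

-- 'if in s then skip else append' over any char list is filter by non-membership
theorem pvFoldFilter (p : Char → Bool) (cs : List Char) (acc : List Char) :
    cs.foldl (fun a c => if p c then a else a ++ [c]) acc
      = acc ++ cs.filter (fun c => !p c) := by
  induction cs generalizing acc with
  | nil => simp
  | cons c cs ih =>
    simp only [List.foldl_cons, List.filter_cons]
    by_cases h : p c = true
    · simp [h, ih]
    · simp only [Bool.not_eq_true] at h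
      simp [h, ih]

-- single-char 'in s' is list membership
theorem pvIsIn_singleton (c : Char) (s : String) :
    PySem.Str.isIn (String.ofList [c]) s = decide (c ∈ s.toList) := by
  rcases h : decide (c ∈ s.toList) with _ | _
  · simp only [decide_eq_false_iff_not] at h
    rcases h2 : PySem.Str.isIn (String.ofList [c]) s
    · rfl
    · exact absurd ((List.singleton_infix_iff c s.toList).mp
        (by simpa using (PySem.Str.isIn_iff_infix _ s).mp h2)) h
  · simp only [decide_eq_true_eq] at h
    exact (PySem.Str.isIn_iff_infix _ s).mpr (by simpa using (List.singleton_infix_iff c s.toList).mpr h)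

theorem pvAlpha_eq (s : String) :
    missingCharacters s
      = String.ofList
          ((("0123456789abcdefghijklmnopqrstuvwxyz" : String).toList).filter
            (fun c => !PySem.Str.isIn (String.ofList [c]) s)) := by
  show String.ofList
      ((['0','1','2','3','4','5','6','7','8','9'] : List Char).foldl
          (fun a c => if PySem.Str.isIn (String.ofList [c]) s then a else a ++ [c]) [] |>
        (fun u1 => (['a','b','c','d','e','f','g','h','i','j','k','l','m','n',
                     'o','p','q','r','s','t','u','v','w','x','y','z'] : List Char).foldl
          (fun a c => if PySem.Str.isIn (String.ofList [c]) s then a else a ++ [c]) u1)) = _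
  simp only [pvFoldFilter, List.nil_append, ← List.filter_append]
  congr 1

theorem pvJoin_singletons (cs : List Char) :
    PySem.Str.join "" (cs.map (fun c => String.ofList [c])) = String.ofList cs := by
  simp only [PySem.Str.join]
  have hmap : List.map String.toList (cs.map (fun c => String.ofList [c])) = cs.map (fun c => [c]) := by
    simp
  rw [hmap]
  have h2 : ("" : String).toList = [] := rfl
  rw [h2, PySem.Chars.join_nil_singletons]

theorem missingCharacters_alt_eq (s : String) :
    missingCharacters_alt s
      = String.ofList
          ((("0123456789abcdefghijklmnopqrstuvwxyz" : String).toList).filter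
            (fun c => !PySem.Str.isIn (String.ofList [c]) s)) := by
  unfold missingCharacters_alt
  have hself : PySem.Set.ofList ("0123456789abcdefghijklmnopqrstuvwxyz" : String).toList
      = ("0123456789abcdefghijklmnopqrstuvwxyz" : String).toList :=
    PySem.Set.ofList_eq_self_of_nodup _ (by decide)
  simp only [PySem.Set.diff, hself]
  have hpred : ∀ c : Char,
      (!PySem.Set.contains (PySem.Set.ofList s.toList) c)
        = (!PySem.Str.isIn (String.ofList [c]) s) := by
    intro c
    rw [pvIsIn_singleton]
    rcases h : decide (c ∈ s.toList) with _ | _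
    · simp only [decide_eq_false_iff_not] at h
      simp [h]
    · simp only [decide_eq_true_eq] at h
      simp [h]
  have hfil :
      (("0123456789abcdefghijklmnopqrstuvwxyz" : String).toList).filter
          (fun c => !PySem.Set.contains (PySem.Set.ofList s.toList) c)
        = (("0123456789abcdefghijklmnopqrstuvwxyz" : String).toList).filter
          (fun c => !PySem.Str.isIn (String.ofList [c]) s) :=
    List.filter_congr (fun c _ => hpred c)
  rw [hfil]
  have hsorted :
      PySem.List.sorted
          ((("0123456789abcdefghijklmnopqrstuvwxyz" : String).toList).filter
            (fun c => !PySem.Str.isIn (String.ofList [c]) s)) (fun c => c)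
        = (("0123456789abcdefghijklmnopqrstuvwxyz" : String).toList).filter
            (fun c => !PySem.Str.isIn (String.ofList [c]) s) :=
    PySem.List.sorted_eq_of_perm_of_pairwise_lt _ _ _ (List.Perm.refl _)
      (List.Pairwise.filter _ (by decide))
  rw [hsorted, pvJoin_singletons]

-- ===== VERDICT (by name: the statement is the Claim_ definition above) =====
theorem missingCharacters_spec : Claim_equal_missingCharacters := by
  intro s _
  unfold Spec_missingCharacters
  rw [pvAlpha_eq, missingCharacters_alt_eq]
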